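-- pv_equiv track=rewrite | github.com/briancp37/synmax | src/data_agent/core/multi_stage.py | _detect_operations
-- ===== SOURCE A (Python) =====
-- def _detect_operations(query: str) -> list[str]:
--     """Auto-detect which operations to run based on query content."""
--     query_lower = query.lower()
--     operations = []
--
--     # Always include basic data summary
--     operations.append("summary")
--
--     # Changepoint detection
--     if any(
--         term in query_lower
--         for term in ["change", "shift", "break", "discontinu", "regime", "pattern", "behavior"]
--     ):
--         operations.append("changepoint")
--
--     # Clustering
--     if any(
--         term in query_lower
--         for term in ["cluster", "group", "similar", "pattern", "behavior", "fingerprint"]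
--     ):
--         operations.append("cluster")
--
--     # Metrics
--     if any(term in query_lower for term in ["ramp", "volatil", "swing", "variab"]):
--         operations.append("ramp_risk")
--
--     if any(
--         term in query_lower
--         for term in ["revers", "direction", "flow direction", "back", "forth"]
--     ):
--         operations.append("reversal_freq")
--
--     if any(term in query_lower for term in ["imbalanc", "receipt", "deliver", "net", "diff"]):
--         operations.append("imbalance_pct")
--
--     # Seasonality/temporal patterns
--     if any(
--         term in query_lower
--         for term in ["season", "month", "quarter", "annual", "cycl", "period"]
--     ):
--         operations.append("seasonality")
--
--     return operations
-- ===== SOURCE B (Python) =====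
-- # Inverted index: keyword term -> operations it triggers; one scan over terms,
-- # collect triggered ops in a set, then emit in canonical order after "summary".
-- _TERM_OPS = {
--     "change": ["changepoint"],
--     "shift": ["changepoint"],
--     "break": ["changepoint"],
--     "discontinu": ["changepoint"],
--     "regime": ["changepoint"],
--     "pattern": ["changepoint", "cluster"],
--     "behavior": ["changepoint", "cluster"],
--     "cluster": ["cluster"],
--     "group": ["cluster"],
--     "similar": ["cluster"],
--     "fingerprint": ["cluster"],
--     "ramp": ["ramp_risk"],
--     "volatil": ["ramp_risk"],
--     "swing": ["ramp_risk"],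
--     "variab": ["ramp_risk"],
--     "revers": ["reversal_freq"],
--     "direction": ["reversal_freq"],
--     "flow direction": ["reversal_freq"],
--     "back": ["reversal_freq"],
--     "forth": ["reversal_freq"],
--     "imbalanc": ["imbalance_pct"],
--     "receipt": ["imbalance_pct"],
--     "deliver": ["imbalance_pct"],
--     "net": ["imbalance_pct"],
--     "diff": ["imbalance_pct"],
--     "season": ["seasonality"],
--     "month": ["seasonality"],
--     "quarter": ["seasonality"],
--     "annual": ["seasonality"],
--     "cycl": ["seasonality"],
--     "period": ["seasonality"],
-- }
--
-- _ORDER = ["changepoint", "cluster", "ramp_risk", "reversal_freq", "imbalance_pct", "seasonality"]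
--
--
-- def _detect_operations(query: str) -> list[str]:
--     query_lower = query.lower()
--     triggered = set()
--     for term, ops in _TERM_OPS.items():
--         if term in query_lower:
--             triggered.update(ops)
--     return ["summary"] + [op for op in _ORDER if op in triggered]
-- ===== Notes on version B (the rewrite author's own statement) =====
-- stated objective: alternative
-- what changed: Replaces seven per-operation keyword branches with an inverted term-to-operations index scanned once, collecting triggered operations in a set and emitting them in a fixed canonical order after the unconditional summary entry.
import Mathlib
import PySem

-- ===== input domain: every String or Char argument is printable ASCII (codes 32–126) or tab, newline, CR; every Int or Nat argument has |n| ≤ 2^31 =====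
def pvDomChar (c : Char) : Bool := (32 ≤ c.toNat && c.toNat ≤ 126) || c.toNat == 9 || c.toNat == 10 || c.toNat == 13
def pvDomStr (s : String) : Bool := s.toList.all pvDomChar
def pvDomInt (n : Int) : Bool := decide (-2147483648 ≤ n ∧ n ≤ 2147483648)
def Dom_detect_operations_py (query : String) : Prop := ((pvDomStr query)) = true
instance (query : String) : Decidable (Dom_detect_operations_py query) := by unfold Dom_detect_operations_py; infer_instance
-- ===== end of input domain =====

-- B inverts A's per-operation keyword branches into a term→operations index scanned once into a
-- set of triggered operations, emitted in canonical order; same cost, an alternative structure.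
-- ===== PORT A =====
def detect_operations_py (query : String) : List String :=
  let query_lower := PySem.Str.lower query
  let operations : List String := []
  let operations := operations ++ ["summary"]
  let operations := if ["change", "shift", "break", "discontinu", "regime", "pattern", "behavior"].any
      (fun term => PySem.Str.isIn term query_lower) then operations ++ ["changepoint"] else operations
  let operations := if ["cluster", "group", "similar", "pattern", "behavior", "fingerprint"].any
      (fun term => PySem.Str.isIn term query_lower) then operations ++ ["cluster"] else operations
  let operations := if ["ramp", "volatil", "swing", "variab"].any
      (fun term => PySem.Str.isIn term query_lower) then operations ++ ["ramp_risk"] else operations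
  let operations := if ["revers", "direction", "flow direction", "back", "forth"].any
      (fun term => PySem.Str.isIn term query_lower) then operations ++ ["reversal_freq"] else operations
  let operations := if ["imbalanc", "receipt", "deliver", "net", "diff"].any
      (fun term => PySem.Str.isIn term query_lower) then operations ++ ["imbalance_pct"] else operations
  let operations := if ["season", "month", "quarter", "annual", "cycl", "period"].any
      (fun term => PySem.Str.isIn term query_lower) then operations ++ ["seasonality"] else operations
  operations

-- ===== PORT B =====
def termOps : PySem.Dict String (List String) :=
  PySem.Dict.ofList
  [ ("change", ["changepoint"]), ("shift", ["changepoint"]), ("break", ["changepoint"]),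
    ("discontinu", ["changepoint"]), ("regime", ["changepoint"]),
    ("pattern", ["changepoint", "cluster"]), ("behavior", ["changepoint", "cluster"]),
    ("cluster", ["cluster"]), ("group", ["cluster"]), ("similar", ["cluster"]),
    ("fingerprint", ["cluster"]),
    ("ramp", ["ramp_risk"]), ("volatil", ["ramp_risk"]), ("swing", ["ramp_risk"]),
    ("variab", ["ramp_risk"]),
    ("revers", ["reversal_freq"]), ("direction", ["reversal_freq"]),
    ("flow direction", ["reversal_freq"]), ("back", ["reversal_freq"]), ("forth", ["reversal_freq"]),
    ("imbalanc", ["imbalance_pct"]), ("receipt", ["imbalance_pct"]), ("deliver", ["imbalance_pct"]),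
    ("net", ["imbalance_pct"]), ("diff", ["imbalance_pct"]),
    ("season", ["seasonality"]), ("month", ["seasonality"]), ("quarter", ["seasonality"]),
    ("annual", ["seasonality"]), ("cycl", ["seasonality"]), ("period", ["seasonality"]) ]

def orderList : List String :=
  ["changepoint", "cluster", "ramp_risk", "reversal_freq", "imbalance_pct", "seasonality"]

def detect_operations_py_alt (query : String) : List String :=
  let query_lower := PySem.Str.lower query
  let triggered : PySem.Set String :=
    (PySem.Dict.items termOps).foldl
      (fun s p => if PySem.Str.isIn p.1 query_lower then PySem.Set.update s p.2 else s)
      PySem.Set.empty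
  ["summary"] ++ orderList.filter (fun op => PySem.Set.contains triggered op)

-- ===== PRECONDITION & SPEC =====
def Spec_detect_operations_py (query : String) (out : List String) : Prop := out = detect_operations_py_alt query
instance (query : String) (out : List String) : Decidable (Spec_detect_operations_py query out) := by unfold Spec_detect_operations_py; infer_instance

-- ===== CLAIM (what is proved, stated in full; the proofs are below) =====
def Claim_equal_detect_operations_py : Prop := ∀ (query : String), Dom_detect_operations_py query → Spec_detect_operations_py query (detect_operations_py query)

-- ===== LEMMAS AND PROOFS =====

theorem contains_update (s : PySem.Set String) (xs : List String) (x : String) :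
    (PySem.Set.update s xs).contains x = (s.contains x || xs.contains x) := by
  induction xs generalizing s with
  | nil => simp [PySem.Set.update]
  | cons y ys ih =>
      show (PySem.Set.update (s.add y) ys).contains x = _
      rw [ih]
      by_cases h : x = y
      · subst h
        simp [PySem.Set.add, PySem.Set.contains]
        split <;> simp_all
      · have hadd : (s.add y).contains x = s.contains x := by
          simp only [PySem.Set.add, PySem.Set.contains]
          split <;> simp [h]
        simp [hadd, PySem.Set.contains, h]

theorem contains_foldl (ql : String) (L : List (String × List String))
    (s : PySem.Set String) (x : String) :
    (L.foldl (fun s p => if PySem.Str.isIn p.1 ql then PySem.Set.update s p.2 else s) s).contains x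
      = (s.contains x || L.any (fun p => PySem.Str.isIn p.1 ql && p.2.contains x)) := by
  induction L generalizing s with
  | nil => simp
  | cons p ps ih =>
      simp only [List.foldl_cons, List.any_cons, ih]
      by_cases h : PySem.Str.isIn p.1 ql = true
      · rw [if_pos h, contains_update, h]
        simp [Bool.or_assoc]
      · rw [if_neg h, Bool.eq_false_iff.mpr h]
        simp

-- ===== VERDICT (by name: the statement is the Claim_ definition above) =====
theorem detect_operations_py_spec : Claim_equal_detect_operations_py := by
  intro query _
  unfold Spec_detect_operations_py detect_operations_py detect_operations_py_alt
  simp only [orderList]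
  rw [show (PySem.Dict.items termOps) =
  [ ("change", ["changepoint"]), ("shift", ["changepoint"]), ("break", ["changepoint"]),
    ("discontinu", ["changepoint"]), ("regime", ["changepoint"]),
    ("pattern", ["changepoint", "cluster"]), ("behavior", ["changepoint", "cluster"]),
    ("cluster", ["cluster"]), ("group", ["cluster"]), ("similar", ["cluster"]),
    ("fingerprint", ["cluster"]),
    ("ramp", ["ramp_risk"]), ("volatil", ["ramp_risk"]), ("swing", ["ramp_risk"]),
    ("variab", ["ramp_risk"]),
    ("revers", ["reversal_freq"]), ("direction", ["reversal_freq"]),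
    ("flow direction", ["reversal_freq"]), ("back", ["reversal_freq"]), ("forth", ["reversal_freq"]),
    ("imbalanc", ["imbalance_pct"]), ("receipt", ["imbalance_pct"]), ("deliver", ["imbalance_pct"]),
    ("net", ["imbalance_pct"]), ("diff", ["imbalance_pct"]),
    ("season", ["seasonality"]), ("month", ["seasonality"]), ("quarter", ["seasonality"]),
    ("annual", ["seasonality"]), ("cycl", ["seasonality"]), ("period", ["seasonality"]) ] from by decide]
  simp only [List.filter_cons, List.filter_nil, contains_foldl, List.any_cons, List.any_nil]
  simp only [PySem.Set.contains, PySem.Set.empty, List.elem_nil, List.contains_cons,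
    List.contains_nil, Bool.false_or, Bool.or_false, Bool.and_true, Bool.and_false,
    String.reduceBEq, beq_self_eq_true, Bool.or_true, Bool.true_or, List.nil_append]
  rw [show (PySem.Str.isIn "pattern" (PySem.Str.lower query) || (PySem.Str.isIn "behavior" (PySem.Str.lower query) || (PySem.Str.isIn "cluster" (PySem.Str.lower query) || (PySem.Str.isIn "group" (PySem.Str.lower query) || (PySem.Str.isIn "similar" (PySem.Str.lower query) || PySem.Str.isIn "fingerprint" (PySem.Str.lower query)))))) = (PySem.Str.isIn "cluster" (PySem.Str.lower query) || (PySem.Str.isIn "group" (PySem.Str.lower query) || (PySem.Str.isIn "similar" (PySem.Str.lower query) || (PySem.Str.isIn "pattern" (PySem.Str.lower query) || (PySem.Str.isIn "behavior" (PySem.Str.lower query) || PySem.Str.isIn "fingerprint" (PySem.Str.lower query)))))) from by ac_rfl]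
  generalize (PySem.Str.isIn "change" (PySem.Str.lower query) || (PySem.Str.isIn "shift" (PySem.Str.lower query) || (PySem.Str.isIn "break" (PySem.Str.lower query) || (PySem.Str.isIn "discontinu" (PySem.Str.lower query) || (PySem.Str.isIn "regime" (PySem.Str.lower query) || (PySem.Str.isIn "pattern" (PySem.Str.lower query) || PySem.Str.isIn "behavior" (PySem.Str.lower query))))))) = c1
  generalize (PySem.Str.isIn "cluster" (PySem.Str.lower query) || (PySem.Str.isIn "group" (PySem.Str.lower query) || (PySem.Str.isIn "similar" (PySem.Str.lower query) || (PySem.Str.isIn "pattern" (PySem.Str.lower query) || (PySem.Str.isIn "behavior" (PySem.Str.lower query) || PySem.Str.isIn "fingerprint" (PySem.Str.lower query)))))) = c2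
  generalize (PySem.Str.isIn "ramp" (PySem.Str.lower query) || (PySem.Str.isIn "volatil" (PySem.Str.lower query) || (PySem.Str.isIn "swing" (PySem.Str.lower query) || PySem.Str.isIn "variab" (PySem.Str.lower query)))) = c3
  generalize (PySem.Str.isIn "revers" (PySem.Str.lower query) || (PySem.Str.isIn "direction" (PySem.Str.lower query) || (PySem.Str.isIn "flow direction" (PySem.Str.lower query) || (PySem.Str.isIn "back" (PySem.Str.lower query) || PySem.Str.isIn "forth" (PySem.Str.lower query))))) = c4
  generalize (PySem.Str.isIn "imbalanc" (PySem.Str.lower query) || (PySem.Str.isIn "receipt" (PySem.Str.lower query) || (PySem.Str.isIn "deliver" (PySem.Str.lower query) || (PySem.Str.isIn "net" (PySem.Str.lower query) || PySem.Str.isIn "diff" (PySem.Str.lower query))))) = c5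
  generalize (PySem.Str.isIn "season" (PySem.Str.lower query) || (PySem.Str.isIn "month" (PySem.Str.lower query) || (PySem.Str.isIn "quarter" (PySem.Str.lower query) || (PySem.Str.isIn "annual" (PySem.Str.lower query) || (PySem.Str.isIn "cycl" (PySem.Str.lower query) || PySem.Str.isIn "period" (PySem.Str.lower query)))))) = c6
  cases c1 <;> cases c2 <;> cases c3 <;> cases c4 <;> cases c5 <;> cases c6
  all_goals rfl
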